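-- pv_equiv track=rewrite | github.com/kuznetsovvj/education | algorithms/codeforces/320a.py | check
-- ===== SOURCE A (Python) =====
-- def check(w):
--     # state machine
--     # st = 0 // допускается только 1 (уже было две четверки или первая цифра)
--     # st = 1 // была 1 (допускается 4 или 1)
--     # st = 2 // была 4 (допускается 4 - но последняя или 1)
--     st = 0
--     for i in w:
--         if st == 0:
--             if i == '1':
--                 st = 1
--                 continue
--             return "NO"
--         if st == 1:
--             if i == '1':
--                 st = 1
--                 continue
--             if i == '4':
--                 st = 2
--                 continue
--             return "NO"
--         if st == 2:
--             if i == '1':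
--                 st = 1
--                 continue
--             if i == '4':
--                 st = 0
--                 continue
--             return "NO"
--     return "YES"
-- ===== SOURCE B (Python) =====
-- def check(w):
--     # Global-predicate check: accepted iff empty, or starts with '1',
--     # uses only digits 1 and 4, and never has three 4s in a row.
--     if w == "":
--         return "YES"
--     if w[0] == '1' and set(w) <= {'1', '4'} and '444' not in w:
--         return "YES"
--     return "NO"
-- ===== Notes on version B (the rewrite author's own statement) =====
-- stated objective: simpler
-- what changed: Replaced the per-character 3-state transition machine with three independent whole-string predicates: first char is '1', all chars are in {'1','4'}, and '444' does not occur as a substring (empty string short-circuits to YES).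
import Mathlib
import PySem

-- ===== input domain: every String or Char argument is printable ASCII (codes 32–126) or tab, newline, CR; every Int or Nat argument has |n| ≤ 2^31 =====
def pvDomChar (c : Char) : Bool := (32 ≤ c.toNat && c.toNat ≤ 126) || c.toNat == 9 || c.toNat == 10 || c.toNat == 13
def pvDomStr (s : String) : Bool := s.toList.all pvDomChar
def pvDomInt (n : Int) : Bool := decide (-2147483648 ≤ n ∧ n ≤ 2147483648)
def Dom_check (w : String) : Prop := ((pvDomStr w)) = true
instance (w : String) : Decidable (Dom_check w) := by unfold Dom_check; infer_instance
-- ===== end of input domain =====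

set_option maxRecDepth 4096


-- B replaces A's 3-state per-character machine with three whole-string predicates
-- (first char '1', alphabet {'1','4'}, no '444' substring); same value on every input.

-- ===== PORT A =====
-- A's loop over the characters with state st ∈ {0,1,2}, returning "NO" early.
def checkLoop : Nat → List Char → String
  | _, [] => "YES"
  | st, c :: rest =>
    if st = 0 then
      if c = '1' then checkLoop 1 rest else "NO"
    else if st = 1 then
      if c = '1' then checkLoop 1 rest
      else if c = '4' then checkLoop 2 rest
      else "NO"
    else
      if c = '1' then checkLoop 1 rest
      else if c = '4' then checkLoop 0 rest
      else "NO"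

def check (w : String) : String := checkLoop 0 w.toList

-- ===== PORT B =====
def check_alt (w : String) : String :=
  let cs := w.toList
  if cs.isEmpty then "YES"
  else if cs.headD ' ' == '1' && cs.all (fun c => c == '1' || c == '4')
          && !(PySem.Str.isIn "444" w) then "YES"
  else "NO"

-- ===== PRECONDITION & SPEC =====
def Spec_check (w : String) (out : String) : Prop := out = check_alt w
instance (w : String) (out : String) : Decidable (Spec_check w out) := by unfold Spec_check; infer_instance

-- ===== CLAIM (what is proved, stated in full; the proofs are below) =====
def Claim_equal_check : Prop := ∀ (w : String), Dom_check w → Spec_check w (check w)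

-- ===== LEMMAS AND PROOFS =====

-- Characterisation of A's loop from each of its three states.
theorem checkLoop_char (cs : List Char) :
    (checkLoop 0 cs =
      if (∀ c ∈ cs, c = '1' ∨ c = '4') ∧ ¬ ['4','4','4'] <:+: cs ∧ ¬ ['4'] <+: cs
      then "YES" else "NO")
    ∧ (checkLoop 1 cs =
      if (∀ c ∈ cs, c = '1' ∨ c = '4') ∧ ¬ ['4','4','4'] <:+: cs
      then "YES" else "NO")
    ∧ (checkLoop 2 cs =
      if (∀ c ∈ cs, c = '1' ∨ c = '4') ∧ ¬ ['4','4','4'] <:+: cs ∧ ¬ ['4','4'] <+: cs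
      then "YES" else "NO") := by
  induction cs with
  | nil => refine ⟨?_, ?_, ?_⟩ <;> simp [checkLoop]
  | cons c rest ih =>
    obtain ⟨ih0, ih1, ih2⟩ := ih
    by_cases hc1 : c = '1'
    · subst hc1
      refine ⟨?_, ?_, ?_⟩ <;>
        simp [checkLoop, ih1, List.infix_cons_iff, List.cons_prefix_cons]
    · by_cases hc4 : c = '4'
      · subst hc4
        refine ⟨?_, ?_, ?_⟩
        · simp [checkLoop, List.cons_prefix_cons]
        · rw [show checkLoop 1 ('4' :: rest) = checkLoop 2 rest by
              simp only [checkLoop]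
              simp, ih2]
          refine if_congr ?_ rfl rfl
          simp only [List.infix_cons_iff, List.cons_prefix_cons, List.forall_mem_cons]
          have h4 : ('4' : Char) = '1' ∨ ('4' : Char) = '4' := Or.inr rfl
          tauto
        · rw [show checkLoop 2 ('4' :: rest) = checkLoop 0 rest by
              simp only [checkLoop]
              simp, ih0]
          refine if_congr ?_ rfl rfl
          simp only [List.infix_cons_iff, List.cons_prefix_cons, List.forall_mem_cons]
          have h4 : ('4' : Char) = '1' ∨ ('4' : Char) = '4' := Or.inr rfl
          have h44 : ['4','4'] <+: rest → ['4'] <+: rest :=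
            fun h => (show ['4'] <+: ['4','4'] by decide).trans h
          tauto
      · have hno : ∀ st, checkLoop st (c :: rest) = "NO" := by
          intro st
          simp only [checkLoop]
          split_ifs <;> rfl
        refine ⟨?_, ?_, ?_⟩ <;> rw [hno, if_neg] <;> rintro ⟨hall, -⟩ <;>
          rcases hall c (by simp) with h | h
        · exact hc1 h
        · exact hc4 h
        · exact hc1 h
        · exact hc4 h
        · exact hc1 h
        · exact hc4 h

-- B's boolean test, read as the same proposition.
theorem alt_cond_iff (c : Char) (rest : List Char) :
    ((c :: rest).headD ' ' == '1' && (c :: rest).all (fun c => c == '1' || c == '4')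
        && !(PySem.Chars.isIn ['4','4','4'] (c :: rest))) = true
    ↔ (∀ x ∈ c :: rest, x = '1' ∨ x = '4') ∧ ¬ ['4','4','4'] <:+: c :: rest ∧ ¬ ['4'] <+: c :: rest := by
  simp only [Bool.and_eq_true, Bool.not_eq_true', List.headD_cons, beq_iff_eq,
    List.all_eq_true, Bool.or_eq_true, PySem.Chars.isIn_eq_false_iff, List.cons_prefix_cons]
  constructor
  · rintro ⟨⟨hc, hall⟩, hinf⟩
    refine ⟨fun x hx => by simpa using hall x hx, hinf, fun ⟨h, _⟩ => ?_⟩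
    rw [hc] at h; exact absurd h (by decide)
  · rintro ⟨hall, hinf, hpre⟩
    have hc : c = '1' := by
      rcases hall c (by simp) with h | h
      · exact h
      · exact absurd ⟨h.symm, List.nil_prefix⟩ hpre
    exact ⟨⟨hc, fun x hx => by simpa using hall x hx⟩, hinf⟩

-- ===== VERDICT (by name: the statement is the Claim_ definition above) =====
theorem check_spec : Claim_equal_check := by
  intro w _
  show check w = check_alt w
  unfold check check_alt
  have hbr : PySem.Str.isIn "444" w = PySem.Chars.isIn ['4','4','4'] w.toList := by
    simp [pysem]
  rw [(checkLoop_char w.toList).1, hbr]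
  cases hcs : w.toList with
  | nil => simp
  | cons c rest =>
    simp only [List.isEmpty_cons, Bool.false_eq_true, if_false]
    by_cases hb : ((c :: rest).headD ' ' == '1'
        && (c :: rest).all (fun c => c == '1' || c == '4')
        && !(PySem.Chars.isIn ['4','4','4'] (c :: rest))) = true
    · rw [if_pos ((alt_cond_iff c rest).mp hb), if_pos hb]
    · rw [if_neg (fun hp => hb ((alt_cond_iff c rest).mpr hp)), if_neg hb]
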